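-- pv_equiv track=rewrite | github.com/saurinne/tic_tac_toe | tic_tac_toe.py | end_line
-- ===== SOURCE A (Python) =====
-- TO_WIN = 3
--
-- def end_line(board):
--     for line in board:
--         counter_x = 0
--         counter_o = 0
--
--         for item in line:
--             if item == "x":
--                 counter_x += 1
--                 counter_o = 0
--             elif item == "o":
--                 counter_x = 0
--                 counter_o += 1
--             else:
--                 counter_x = 0
--                 counter_o = 0
--
--             if counter_x >= TO_WIN:
--                 return "x"
--             elif counter_o >= TO_WIN:
--                 return "o"
--
--     return "_"
-- ===== SOURCE B (Python) =====
-- TO_WIN = 3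
--
-- def end_line(board):
--     # stateless sliding window: a win is exactly a window of TO_WIN (=3)
--     # equal adjacent items that are 'x' or 'o'; zip the line with its
--     # shifted copies and take the first such window (in positional order).
--     for line in board:
--         for a, b, c in zip(line, line[1:], line[2:]):
--             if a == b == c and a in ("x", "o"):
--                 return a
--     return "_"
-- ===== Notes on version B (the rewrite author's own statement) =====
-- stated objective: idiomatic
-- what changed: Replaces A's stateful scan with two reset-on-mismatch counters by a stateless sliding-window check: the line is zipped with its two shifted copies and the first window of three equal x/o items wins.
import Mathlib
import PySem

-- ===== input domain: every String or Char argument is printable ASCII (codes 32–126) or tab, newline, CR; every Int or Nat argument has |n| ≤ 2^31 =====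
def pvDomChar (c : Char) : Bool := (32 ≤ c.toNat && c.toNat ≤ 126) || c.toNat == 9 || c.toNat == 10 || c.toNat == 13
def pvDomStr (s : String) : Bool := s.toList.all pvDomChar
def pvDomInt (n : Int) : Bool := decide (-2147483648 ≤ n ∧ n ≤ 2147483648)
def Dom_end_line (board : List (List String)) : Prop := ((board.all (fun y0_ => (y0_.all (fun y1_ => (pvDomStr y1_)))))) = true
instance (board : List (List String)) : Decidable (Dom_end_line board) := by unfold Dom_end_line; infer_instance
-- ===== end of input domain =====

-- B replaces A's reset-on-mismatch x/o counters by a stateless sliding-window (zip with shifted copies) check; idiomatic, same cost.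


def TO_WIN : Int := 3

-- ===== PORT A =====
-- inner loop of A: scan the line keeping (counter_x, counter_o); early return on a win
def goA : List String → Int → Int → Option String
  | [], _, _ => none
  | item :: rest, cx, co =>
    let p : Int × Int :=
      if item = "x" then (cx + 1, 0)
      else if item = "o" then (0, co + 1)
      else (0, 0)
    if p.1 ≥ TO_WIN then some "x"
    else if p.2 ≥ TO_WIN then some "o"
    else goA rest p.1 p.2

def end_line (board : List (List String)) : String :=
  match board with
  | [] => "_"
  | line :: rest =>
    match goA line 0 0 with
    | some w => w
    | none => end_line rest

-- ===== PORT B =====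
-- zip(line, line[1:], line[2:]): all windows of 3 adjacent items, in positional order;
-- the first window of three equal "x"/"o" items wins
def winB (line : List String) : Option String :=
  (line.zip ((line.drop 1).zip (line.drop 2))).findSome? (fun t =>
    if t.1 = t.2.1 ∧ t.2.1 = t.2.2 ∧ (t.1 = "x" ∨ t.1 = "o") then some t.1 else none)

def end_line_alt (board : List (List String)) : String :=
  match board with
  | [] => "_"
  | line :: rest =>
    match winB line with
    | some w => w
    | none => end_line_alt rest

-- ===== PRECONDITION & SPEC =====
def Spec_end_line (board : List (List String)) (out : String) : Prop := out = end_line_alt board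
instance (board : List (List String)) (out : String) : Decidable (Spec_end_line board out) := by unfold Spec_end_line; infer_instance

-- ===== CLAIM (what is proved, stated in full; the proofs are below) =====
def Claim_equal_end_line : Prop := ∀ (board : List (List String)), Dom_end_line board → Spec_end_line board (end_line board)

-- ===== LEMMAS AND PROOFS =====

-- recursive characterisation of winB, used only by the proofs
def wrec : List String → Option String
  | a :: b :: c :: rest =>
    if a = b ∧ b = c ∧ (a = "x" ∨ a = "o") then some a else wrec (b :: c :: rest)
  | _ => none

theorem winB_eq_wrec (l : List String) : winB l = wrec l := by
  induction l with
  | nil => rfl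
  | cons a l' ih =>
    match l' with
    | [] => rfl
    | [b] => rfl
    | b :: c :: rest =>
      have hz : (a :: b :: c :: rest).zip
          (((a :: b :: c :: rest).drop 1).zip ((a :: b :: c :: rest).drop 2))
          = (a, (b, c)) :: ((b :: c :: rest).zip
              (((b :: c :: rest).drop 1).zip ((b :: c :: rest).drop 2))) := by
        simp [List.zip]
      rw [winB, hz, List.findSome?_cons]
      rw [winB] at ih
      by_cases h : a = b ∧ b = c ∧ (a = "x" ∨ a = "o")
      · rw [if_pos h, wrec, if_pos h]
      · rw [if_neg h, wrec, if_neg h]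
        simpa using ih

-- three equal leading x/o items win immediately
theorem wrec_win (s : String) (rest : List String) (hs : s = "x" ∨ s = "o") :
    wrec (s :: s :: s :: rest) = some s := by
  simp [wrec, hs]

-- a non-x/o head item contributes nothing
theorem wrec_cons_bad (item : String) (rest : List String)
    (hx : item ≠ "x") (ho : item ≠ "o") :
    wrec (item :: rest) = wrec rest := by
  match rest with
  | [] => rfl
  | [b] => rfl
  | b :: c :: r => simp [wrec, hx, ho]

-- a pending run of c < 3 copies of s followed by a different item contributes nothing
theorem wrec_drop (c : Nat) (s item : String) (rest : List String)
    (hc : c < 3) (his : item ≠ s) :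
    wrec (List.replicate c s ++ item :: rest) = wrec (item :: rest) := by
  have hsi : s ≠ item := fun h => his h.symm
  interval_cases c
  · rfl
  · match rest with
    | [] => rfl
    | b :: r => simp [List.replicate, wrec, hsi]
  · match rest with
    | [] => simp [List.replicate, wrec, hsi]
    | b :: r =>
      simp only [List.replicate, List.cons_append, List.nil_append]
      rw [wrec, if_neg (by rintro ⟨-, h, -⟩; exact his h.symm)]
      rw [wrec, if_neg (by rintro ⟨h, -, -⟩; exact his h.symm)]

-- wrec of fewer than 3 items is none
theorem wrec_short (c : Nat) (s : String) (hc : c < 3) :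
    wrec (List.replicate c s) = none := by
  interval_cases c <;> rfl

-- main invariant: A's scan with a pending run of c < 3 copies of s encoded in the
-- counters equals B's window check of the line with that run prepended
theorem goA_eq (l : List String) (s : String) (c : Nat)
    (hc : c < 3) (hs : s = "x" ∨ s = "o") :
    goA l (if s = "x" then (c : Int) else 0) (if s = "o" then (c : Int) else 0)
      = wrec (List.replicate c s ++ l) := by
  induction l generalizing s c with
  | nil =>
    have h := wrec_short c s hc
    simp [goA, List.append_nil, h]
  | cons item rest ih =>
    by_cases his : item = s
    · -- the run continues
      subst his
      have hcons : List.replicate c item ++ item :: rest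
          = List.replicate (c + 1) item ++ rest := by
        rw [List.replicate_succ']; simp
      by_cases h3 : c + 1 ≥ 3
      · -- win: counter reaches 3, and the window s::s::s fires
        have hc2 : c = 2 := by omega
        subst hc2
        have hwin : wrec (item :: item :: item :: rest) = some item := wrec_win item rest hs
        rcases hs with h | h <;> subst h <;>
          simp [goA, TO_WIN, List.replicate, hwin]
      · -- run extends, no win yet
        rw [hcons, ← ih item (c + 1) (by omega) hs]
        rcases hs with h | h <;> subst h <;>
          · simp only [goA]
            simp [TO_WIN]
            omega
    · -- run breaks
      rw [wrec_drop c s item rest hc his]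
      by_cases hix : item = "x" <;> by_cases hio : item = "o"
      · simp [hix] at hio
      · -- item = "x", s = "o"
        subst hix
        have hso : s = "o" := hs.resolve_left (fun h => his h.symm)
        subst hso
        have := ih "x" 1 (by omega) (Or.inl rfl)
        simp only [List.replicate_one, List.singleton_append] at this
        rw [← this]
        norm_num [goA, TO_WIN, show (("o":String) = "x") = False from by decide,
          show (("x":String) = "o") = False from by decide]
      · -- item = "o", s = "x"
        subst hio
        have hsx : s = "x" := hs.resolve_right (fun h => his h.symm)
        subst hsx
        have := ih "o" 1 (by omega) (Or.inr rfl)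
        simp only [List.replicate_one, List.singleton_append] at this
        rw [← this]
        norm_num [goA, TO_WIN, show (("o":String) = "x") = False from by decide,
          show (("x":String) = "o") = False from by decide]
      · -- item is neither "x" nor "o": counters reset, window cannot start here
        rw [wrec_cons_bad item rest hix hio]
        have := ih "x" 0 (by omega) (Or.inl rfl)
        simp only [List.replicate_zero, List.nil_append] at this
        rw [← this]
        norm_num [goA, TO_WIN, hix, hio]

-- per-line equality
theorem line_eq (l : List String) : goA l 0 0 = winB l := by
  have := goA_eq l "x" 0 (by omega) (Or.inl rfl)
  simpa [winB_eq_wrec] using this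

theorem end_line_eq_alt (board : List (List String)) : end_line board = end_line_alt board := by
  induction board with
  | nil => rfl
  | cons line rest ih =>
    simp only [end_line, end_line_alt, line_eq]
    cases h : winB line <;> simp [ih]

-- ===== VERDICT (by name: the statement is the Claim_ definition above) =====
theorem end_line_spec : Claim_equal_end_line := by
  intro board _
  exact end_line_eq_alt board
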